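-- pv_equiv track=rewrite | github.com/ivadimn/py-input | skillbox/basic/module18/hwork18.py | process_bad_word
-- ===== SOURCE A (Python) =====
-- def process_bad_word(word: str):
--     new_word = []
--     part_word = []
--     for ch in word:
--         if ch.isalnum():
--             part_word.append(ch)
--         else:
--             part_word.reverse()
--             new_word.append("".join(part_word))
--             part_word.clear()
--             new_word.append(ch)
--     if len(part_word) > 0:
--         part_word.reverse()
--         new_word.append("".join(part_word))
--
--     return "".join(new_word)
-- ===== SOURCE B (Python) =====
-- def process_bad_word(word: str):
--     out = []
--     i, n = 0, len(word)
--     while i < n: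
--         k = word[i].isalnum()
--         j = i + 1
--         while j < n and word[j].isalnum() == k:
--             j += 1
--         run = word[i:j]
--         out.append(run[::-1] if k else run)
--         i = j
--     return "".join(out)
-- ===== Notes on version B (the rewrite author's own statement) =====
-- stated objective: alternative
-- what changed: Replaced A's per-character accumulator with explicit flush logic by a two-pointer scan that finds each maximal isalnum-run by index, slices it out, reverses it when alphanumeric, and joins the runs.
import Mathlib
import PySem

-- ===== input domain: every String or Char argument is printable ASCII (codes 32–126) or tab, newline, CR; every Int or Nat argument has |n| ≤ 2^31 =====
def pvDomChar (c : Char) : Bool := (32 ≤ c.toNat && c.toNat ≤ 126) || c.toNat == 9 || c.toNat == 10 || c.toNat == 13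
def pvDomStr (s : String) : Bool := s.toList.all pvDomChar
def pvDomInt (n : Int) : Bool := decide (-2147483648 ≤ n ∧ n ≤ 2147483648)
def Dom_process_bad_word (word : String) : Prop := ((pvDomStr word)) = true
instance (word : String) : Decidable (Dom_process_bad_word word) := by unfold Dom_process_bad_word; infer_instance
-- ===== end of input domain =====

-- B replaces A's per-character accumulator/flush loop by a two-pointer scan that
-- slices out each maximal alphanumeric run by index; same cost, different structure.

-- ===== PORT A =====
-- A's for-loop over the characters with state (new_word, part_word); "".join = flatten.
def pvALoop (cs : List Char) (newWord : List (List Char)) (partWord : List Char) :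
    List (List Char) :=
  match cs with
  | [] => if partWord.length > 0 then newWord ++ [partWord.reverse] else newWord
  | c :: rest =>
    if PySem.Chars.isalnum c then pvALoop rest newWord (partWord ++ [c])
    else pvALoop rest (newWord ++ [partWord.reverse, [c]]) []

def process_bad_word (word : String) : String :=
  String.ofList (pvALoop word.toList [] []).flatten

-- ===== PORT B =====
-- inner while: advance j while j < n and word[j].isalnum() == k
def pvFindRun (s : List Char) (k : Bool) (j : Nat) : Nat :=
  if h : j < s.length then
    if PySem.Chars.isalnum s[j] = k then pvFindRun s k (j + 1) else j
  else j
termination_by s.length - j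

theorem pvFindRun_ge (s : List Char) (k : Bool) (j : Nat) : j ≤ pvFindRun s k j := by
  fun_induction pvFindRun s k j with
  | case1 j h hk ih => omega
  | case2 j h hk => omega
  | case3 j h => omega

-- outer while over i, collecting each run (word[i:j]), reversed when alphanumeric
def pvBLoop (s : List Char) (i : Nat) : List (List Char) :=
  if h : i < s.length then
    let k := PySem.Chars.isalnum s[i]
    let j := pvFindRun s k (i + 1)
    let run := PySem.List.slice s (some (i : Int)) (some (j : Int))
    (if k then run.reverse else run) :: pvBLoop s j
  else []
termination_by s.length - i
decreasing_by have := pvFindRun_ge s (PySem.Chars.isalnum s[i]) (i + 1); omega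

def process_bad_word_alt (word : String) : String :=
  String.ofList (pvBLoop word.toList 0).flatten

-- ===== PRECONDITION & SPEC =====
def Spec_process_bad_word (word : String) (out : String) : Prop := out = process_bad_word_alt word
instance (word : String) (out : String) : Decidable (Spec_process_bad_word word out) := by unfold Spec_process_bad_word; infer_instance

-- ===== CLAIM (what is proved, stated in full; the proofs are below) =====
def Claim_equal_process_bad_word : Prop := ∀ (word : String), Dom_process_bad_word word → Spec_process_bad_word word (process_bad_word word)

-- ===== LEMMAS AND PROOFS =====

-- the maximal runs of cs, grouped by isalnum (specification both loops are reduced to)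
def pvGroups (cs : List Char) : List (Bool × List Char) :=
  match cs with
  | [] => []
  | c :: rest =>
    match pvGroups rest with
    | [] => [(PySem.Chars.isalnum c, [c])]
    | (k, g) :: gs =>
      if PySem.Chars.isalnum c = k then (k, c :: g) :: gs
      else (PySem.Chars.isalnum c, [c]) :: (k, g) :: gs

def pvOut (cs : List Char) : List Char :=
  ((pvGroups cs).map (fun p => if p.1 then p.2.reverse else p.2)).flatten

theorem pvGroups_head (c : Char) (rest : List Char) :
    ∃ g gs, pvGroups (c :: rest) = (PySem.Chars.isalnum c, g) :: gs := by
  rw [pvGroups]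
  rcases h : pvGroups rest with _ | ⟨⟨k, g⟩, gs⟩
  · exact ⟨[c], [], rfl⟩
  · by_cases hk : PySem.Chars.isalnum c = k
    · exact ⟨c :: g, gs, by simp [hk]⟩
    · exact ⟨[c], (k, g) :: gs, by simp [hk]⟩

theorem pvGroups_cons (c : Char) (rest : List Char) :
    pvGroups (c :: rest) =
      match pvGroups rest with
      | [] => [(PySem.Chars.isalnum c, [c])]
      | (k, g) :: gs =>
        if PySem.Chars.isalnum c = k then (k, c :: g) :: gs
        else (PySem.Chars.isalnum c, [c]) :: (k, g) :: gs := rfl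

theorem pvGroups_run (run : List Char) (k : Bool) (tail : List Char)
    (hne : run ≠ []) (hall : ∀ x ∈ run, PySem.Chars.isalnum x = k)
    (hhd : ∀ c, tail.head? = some c → PySem.Chars.isalnum c ≠ k) :
    pvGroups (run ++ tail) = (k, run) :: pvGroups tail := by
  induction run with
  | nil => exact absurd rfl hne
  | cons r run' ih =>
    have hr : PySem.Chars.isalnum r = k := hall r (by simp)
    rcases run' with _ | ⟨r', run''⟩
    · rcases tail with _ | ⟨c, t⟩
      · simp [pvGroups, hr]
      · obtain ⟨g, gs, hg⟩ := pvGroups_head c t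
        have hc : PySem.Chars.isalnum c ≠ k := hhd c rfl
        have hck : ¬ (PySem.Chars.isalnum r = PySem.Chars.isalnum c) := by
          rw [hr]; exact fun h => hc h.symm
        rw [List.singleton_append, pvGroups_cons, hg]; simp [hr]; exact fun h => hc h.symm
    · have ih' := ih (by simp) (fun x hx => hall x (List.mem_cons_of_mem r hx))
      rw [List.cons_append, pvGroups_cons, ih']; simp [hr]

theorem pvOut_cons_false (c : Char) (rest : List Char)
    (hc : PySem.Chars.isalnum c = false) :
    pvOut (c :: rest) = c :: pvOut rest := by
  unfold pvOut
  rw [pvGroups]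
  rcases h : pvGroups rest with _ | ⟨⟨k, g⟩, gs⟩
  · simp [hc]
  · by_cases hk : k = false
    · subst hk; simp [hc]
    · simp at hk; subst hk; simp [hc]

theorem pvOut_run (run : List Char) (k : Bool) (tail : List Char)
    (hne : run ≠ []) (hall : ∀ x ∈ run, PySem.Chars.isalnum x = k)
    (hhd : ∀ c, tail.head? = some c → PySem.Chars.isalnum c ≠ k) :
    pvOut (run ++ tail) = (if k then run.reverse else run) ++ pvOut tail := by
  unfold pvOut
  rw [pvGroups_run run k tail hne hall hhd]
  simp

theorem pvALoop_flatten (cs : List Char) :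
    ∀ (partWord : List Char) (newWord : List (List Char)),
      (∀ x ∈ partWord, PySem.Chars.isalnum x = true) →
      (pvALoop cs newWord partWord).flatten = newWord.flatten ++ pvOut (partWord ++ cs) := by
  induction cs with
  | nil =>
    intro partWord newWord hall
    by_cases hp : partWord = []
    · subst hp; simp [pvALoop, pvOut, pvGroups]
    · have hg : pvGroups (partWord ++ []) = (true, partWord) :: pvGroups [] :=
        pvGroups_run partWord true [] hp hall (by simp)
      simp only [List.append_nil] at hg ⊢
      have hlen : 0 < partWord.length := List.length_pos_iff.mpr hp
      rw [pvALoop, if_pos hlen]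
      simp [pvOut, hg, pvGroups]
  | cons c rest ih =>
    intro partWord newWord hall
    rw [pvALoop]
    by_cases hc : PySem.Chars.isalnum c = true
    · rw [if_pos hc, ih (partWord ++ [c]) newWord
        (by intro x hx; rcases List.mem_append.mp hx with h | h
            · exact hall x h
            · simp at h; subst h; exact hc)]
      simp
    · rw [if_neg hc]
      rw [ih [] (newWord ++ [partWord.reverse, [c]]) (by simp)]
      have hstep : pvOut (partWord ++ c :: rest) = partWord.reverse ++ c :: pvOut rest := by
        rcases hp : partWord with _ | ⟨p, ps⟩
        · simpa using pvOut_cons_false c rest (by simpa using hc)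
        · rw [← hp]
          rw [pvOut_run partWord true (c :: rest) (by simp [hp]) hall
            (by intro x hx; simp at hx; subst hx; simpa using hc)]
          rw [pvOut_cons_false c rest (by simpa using hc)]
          simp
      rw [hstep]
      simp

theorem pvFindRun_le (s : List Char) (k : Bool) (j : Nat) :
    pvFindRun s k j ≤ s.length ∨ pvFindRun s k j = j := by
  fun_induction pvFindRun s k j with
  | case1 j h hk ih => rcases ih with h' | h' <;> omega
  | case2 j h hk => omega
  | case3 j h => omega

theorem pvFindRun_mem (s : List Char) (k : Bool) (j : Nat) :
    ∀ m, j ≤ m → m < pvFindRun s k j →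
      ∃ (hm : m < s.length), PySem.Chars.isalnum (s[m]'hm) = k := by
  fun_induction pvFindRun s k j with
  | case1 j h hk ih =>
    intro m hjm hm
    by_cases hmj : m = j
    · subst hmj; exact ⟨h, hk⟩
    · exact ih m (by omega) hm
  | case2 j h hk => intro m hjm hm; omega
  | case3 j h => intro m hjm hm; omega

theorem pvFindRun_stop (s : List Char) (k : Bool) (j : Nat) :
    ∀ (h : pvFindRun s k j < s.length), PySem.Chars.isalnum (s[pvFindRun s k j]'h) ≠ k := by
  fun_induction pvFindRun s k j with
  | case1 j h hk ih => exact ih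
  | case2 j h hk => intro _; simpa using hk
  | case3 j h => intro h'; omega

theorem pvBLoop_flatten (s : List Char) (i : Nat) :
    (pvBLoop s i).flatten = pvOut (s.drop i) := by
  fun_induction pvBLoop s i with
  | case1 i h k j run ih =>
    have hj1 : i + 1 ≤ j := pvFindRun_ge s k (i + 1)
    have hjle : j ≤ s.length := by
      rcases pvFindRun_le s k (i + 1) with h' | h' <;> omega
    have hrun : run = (s.drop i).take (j - i) := PySem.List.slice_natCast s i j
    have hsplit : s.drop i = run ++ s.drop j := by
      have h2 : (List.drop i s).drop (j - i) = List.drop j s := by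
        rw [List.drop_drop]; congr 1; omega
      rw [hrun, ← h2, List.take_append_drop]
    have hne : run ≠ [] := by
      have : run.length = min (j - i) (s.length - i) := by
        rw [hrun]; simp
      intro hcon
      rw [hcon] at this
      simp at this
      omega
    have hall : ∀ x ∈ run, PySem.Chars.isalnum x = k := by
      intro x hx
      rw [hrun] at hx
      obtain ⟨m, hm, hxe⟩ := List.mem_iff_getElem.mp hx
      have hmlt : m < j - i := by
        have := hm; simp [List.length_take, List.length_drop] at this; omega
      have hmd : i + m < s.length := by
        simp [List.length_take, List.length_drop] at hm; omega
      have hval : x = s[i + m]'hmd := by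
        rw [← hxe]
        simp [List.getElem_take, List.getElem_drop]
      by_cases hm0 : m = 0
      · subst hm0
        rw [hval]
        simp only [Nat.add_zero]
        rfl
      · obtain ⟨hlt, hk⟩ := pvFindRun_mem s k (i + 1) (i + m) (by omega) (by omega)
        rw [hval]; exact hk
    have hhd : ∀ c, (s.drop j).head? = some c → PySem.Chars.isalnum c ≠ k := by
      intro c hcc
      have hjlt : j < s.length := by
        rcases Nat.lt_or_ge j s.length with h' | h'
        · exact h'
        · exfalso; rw [List.drop_of_length_le h'] at hcc; simp at hcc
      have : (s.drop j).head? = some (s[j]'hjlt) := by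
        rw [List.head?_drop]
        simp [hjlt]
      rw [this] at hcc
      obtain rfl : c = s[j]'hjlt := (Option.some.inj hcc).symm
      exact pvFindRun_stop s k (i + 1) hjlt
    rw [List.flatten_cons, ih, hsplit, pvOut_run run k (s.drop j) hne hall hhd]
  | case2 i h =>
    rw [List.drop_of_length_le (by omega)]
    simp [pvOut, pvGroups]

-- ===== VERDICT (by name: the statement is the Claim_ definition above) =====
theorem process_bad_word_spec : Claim_equal_process_bad_word := by
  intro word _
  unfold Spec_process_bad_word process_bad_word process_bad_word_alt
  rw [pvALoop_flatten word.toList [] [] (by simp), pvBLoop_flatten word.toList 0]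
  simp
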